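-- pv_equiv track=rewrite | github.com/linhdvu14/cp-sols | sols/CodeForces/1849_edu/C_Binary_String_Copying.py | solve
-- ===== SOURCE A (Python) =====
-- def solve(N, M, S, segs):
--     # nxt[i] = min j >= i s.t. S[j] = 1
--     nxt = [N] * (N + 1)
--     for i in range(N - 1, -1, -1):
--         if S[i] == 1: nxt[i] = i
--         else: nxt[i] = nxt[i + 1]
--
--     # prv[i] = max j <= i s.t. S[j] = 0
--     prv = [-1] * (N + 1)
--     for i in range(N):
--         if S[i] == 0: prv[i] = i
--         else: prv[i] = prv[i - 1]
--
--     res = set()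
--     for l, r in segs:
--         l = nxt[l - 1]
--         r = prv[r - 1]
--         if l > r: res.add((-1, -1))
--         else: res.add((l, r))
--
--     return len(res)
-- ===== SOURCE B (Python) =====
-- def solve(N, M, S, segs):
--     ones = [i for i in range(N) if S[i] == 1]
--     zeros = [i for i in range(N) if S[i] == 0]
--     # one slot per position, plus a sentinel slot for empty queries
--     nxt = [next((p for p in ones if p >= i), N) for i in range(N)] + [N]
--     prv = [next((p for p in reversed(zeros) if p <= i), -1) for i in range(N)] + [-1]
--     res = set()
--     for l, r in segs:
--         a, b = nxt[l - 1], prv[r - 1]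
--         res.add((a, b) if a <= b else (-1, -1))
--     return len(res)
-- ===== Notes on version B (the rewrite author's own statement) =====
-- stated objective: alternative
-- what changed: Replaces the backward/forward DP recurrences with two position lists (indices of ones and of zeros) from which the next-one / previous-zero tables are built directly, one comprehension search per slot plus a sentinel slot for empty queries; the query loop then just indexes these tables.
import Mathlib
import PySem

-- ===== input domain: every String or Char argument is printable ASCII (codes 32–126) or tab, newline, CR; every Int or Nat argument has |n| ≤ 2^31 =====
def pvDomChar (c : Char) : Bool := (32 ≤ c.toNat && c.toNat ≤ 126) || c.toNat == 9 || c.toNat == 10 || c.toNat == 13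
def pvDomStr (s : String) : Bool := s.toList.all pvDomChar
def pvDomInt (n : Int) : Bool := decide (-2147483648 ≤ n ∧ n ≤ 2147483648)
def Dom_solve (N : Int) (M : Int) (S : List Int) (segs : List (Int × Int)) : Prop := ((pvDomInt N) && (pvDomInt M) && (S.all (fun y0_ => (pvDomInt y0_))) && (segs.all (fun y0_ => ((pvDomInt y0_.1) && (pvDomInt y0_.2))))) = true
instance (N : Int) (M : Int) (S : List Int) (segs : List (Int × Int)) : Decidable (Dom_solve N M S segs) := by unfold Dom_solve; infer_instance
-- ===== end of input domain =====

-- B builds the next-one / previous-zero tables by per-slot searches over two position lists instead of A's DP recurrences; an alternative, proved equal on A's raise-free domain.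

-- ===== PORT A =====
def solve (N : Int) (M : Int) (S : List Int) (segs : List (Int × Int)) : Int :=
  let nxt := PySem.List.pyRepeat [N] (N + 1)
  let nxt := (PySem.List.pyRange (N - 1) (-1) (-1)).foldl
      (fun nxt i =>
        if PySem.List.pyGetD S i 0 == 1 then PySem.List.pySetD nxt i i
        else PySem.List.pySetD nxt i (PySem.List.pyGetD nxt (i + 1) 0)) nxt
  let prv := PySem.List.pyRepeat [(-1 : Int)] (N + 1)
  let prv := (PySem.List.pyRange 0 N).foldl
      (fun prv i =>
        if PySem.List.pyGetD S i 0 == 0 then PySem.List.pySetD prv i i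
        else PySem.List.pySetD prv i (PySem.List.pyGetD prv (i - 1) 0)) prv
  let res := segs.foldl (fun res lr =>
      let l := PySem.List.pyGetD nxt (lr.1 - 1) 0
      let r := PySem.List.pyGetD prv (lr.2 - 1) 0
      if l > r then PySem.Set.add res ((-1 : Int), (-1 : Int)) else PySem.Set.add res (l, r))
    (PySem.Set.ofList ([] : List (Int × Int)))
  PySem.Set.len res

-- ===== PORT B =====
def solve_alt (N : Int) (M : Int) (S : List Int) (segs : List (Int × Int)) : Int :=
  let ones := (PySem.List.pyRange 0 N).filter (fun i => PySem.List.pyGetD S i 0 == 1)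
  let zeros := (PySem.List.pyRange 0 N).filter (fun i => PySem.List.pyGetD S i 0 == 0)
  let nxt := ((PySem.List.pyRange 0 N).map
      (fun i => (ones.find? (fun p => decide (i ≤ p))).getD N)) ++ [N]
  let prv := ((PySem.List.pyRange 0 N).map
      (fun i => (zeros.reverse.find? (fun p => decide (p ≤ i))).getD (-1))) ++ [(-1 : Int)]
  let res := segs.foldl (fun res lr =>
      let a := PySem.List.pyGetD nxt (lr.1 - 1) 0
      let b := PySem.List.pyGetD prv (lr.2 - 1) 0
      PySem.Set.add res (if a ≤ b then (a, b) else ((-1 : Int), (-1 : Int))))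
    (PySem.Set.ofList ([] : List (Int × Int)))
  PySem.Set.len res

-- ===== PRECONDITION & SPEC =====
-- Pre_ is exactly A's raise-free domain: N ≤ len(S) when 0 ≤ N (else the table build raises
-- IndexError), and every query's l-1 and r-1 a valid Python index into the length-(N+1) tables
-- (A raises IndexError otherwise, in particular on any query when N < 0).
def Pre_solve (N : Int) (M : Int) (S : List Int) (segs : List (Int × Int)) : Prop :=
  (0 ≤ N → N ≤ (S.length : Int)) ∧
    ∀ lr ∈ segs, 0 ≤ N ∧ -N ≤ lr.1 ∧ lr.1 ≤ N + 1 ∧ -N ≤ lr.2 ∧ lr.2 ≤ N + 1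
instance (N : Int) (M : Int) (S : List Int) (segs : List (Int × Int)) : Decidable (Pre_solve N M S segs) := by unfold Pre_solve; infer_instance
def pvWitness_solve : Int × Int × List Int × (List (Int × Int)) := (4, 2, [1, 0, 0, 1], [(1, 3), (2, 4)])

def Spec_solve (N : Int) (M : Int) (S : List Int) (segs : List (Int × Int)) (out : Int) : Prop := out = solve_alt N M S segs
instance (N : Int) (M : Int) (S : List Int) (segs : List (Int × Int)) (out : Int) : Decidable (Spec_solve N M S segs out) := by unfold Spec_solve; infer_instance

-- ===== CLAIM (what is proved, stated in full; the proofs are below) =====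
def Claim_equal_solve : Prop := ∀ (N : Int) (M : Int) (S : List Int) (segs : List (Int × Int)), Dom_solve N M S segs → Pre_solve N M S segs → Spec_solve N M S segs (solve N M S segs)

-- ===== LEMMAS AND PROOFS =====

-- first position j with i ≤ j < n and S[j] = 1, else n
def firstOne (S : List Int) (n : Nat) (i : Nat) : Int :=
  if _h : i < n then (if S.getD i 0 = 1 then (i : Int) else firstOne S n (i + 1)) else (n : Int)
termination_by n - i

-- last position j with j ≤ i and S[j] = 0, else -1
def lastZero (S : List Int) (i : Nat) : Int :=
  if S.getD i 0 = 0 then (i : Int) else if _h : i = 0 then -1 else lastZero S (i - 1)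
termination_by i
decreasing_by omega

-- A's backward loop computes firstOne at every index
theorem nxt_inv (S : List Int) (n : Nat) : ∀ (k : Nat) (cur : List Int), k ≤ n → cur.length = n + 1 →
    (∀ j : Nat, k ≤ j → j ≤ n → PySem.List.pyGetD cur (j : Int) 0 = firstOne S n j) →
    ∀ j : Nat, j ≤ n →
      PySem.List.pyGetD
        (((PySem.List.pyRange 0 (k : Int)).reverse).foldl
          (fun nxt i =>
            if PySem.List.pyGetD S i 0 == 1 then PySem.List.pySetD nxt i i
            else PySem.List.pySetD nxt i (PySem.List.pyGetD nxt (i + 1) 0)) cur) (j : Int) 0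
        = firstOne S n j := by
  intro k
  induction k with
  | zero =>
    intro cur _hk hlen hinv j hj
    rw [show ((0 : Nat) : Int) = 0 by norm_num, PySem.List.pyRange_one_eq_nil (by norm_num)]
    simpa using hinv j (by omega) hj
  | succ k IH =>
    intro cur hk hlen hinv j hj
    rw [show ((k + 1 : Nat) : Int) = (k : Int) + 1 by push_cast; ring,
      PySem.List.pyRange_one_succ_right (by positivity : (0 : Int) ≤ (k : Int)),
      List.reverse_append, List.reverse_singleton, List.singleton_append, List.foldl_cons]
    have hvk : (if PySem.List.pyGetD S (k : Int) 0 == 1 then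
          PySem.List.pySetD cur (k : Int) (k : Int)
        else PySem.List.pySetD cur (k : Int) (PySem.List.pyGetD cur ((k : Int) + 1) 0))
        = PySem.List.pySetD cur (k : Int) (firstOne S n k) := by
      rw [firstOne, dif_pos (by omega : k < n)]
      by_cases h1 : S.getD k 0 = 1
      · have hb : (PySem.List.pyGetD S (k : Int) 0 == 1) = true := by
          rw [PySem.List.pyGetD_natCast, h1]; rfl
        rw [hb, if_pos h1]
        rfl
      · have hb : (PySem.List.pyGetD S (k : Int) 0 == 1) = false := by
          rw [PySem.List.pyGetD_natCast]; simpa using h1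
        rw [hb, if_neg h1]
        simp only [Bool.false_eq_true, if_false]
        rw [show ((k : Int) + 1) = ((k + 1 : Nat) : Int) by push_cast; ring,
          hinv (k + 1) (by omega) (by omega)]
    rw [hvk]
    refine IH (PySem.List.pySetD cur (k : Int) (firstOne S n k)) (by omega)
      (by rw [PySem.List.length_pySetD]; exact hlen) ?_ j hj
    intro j' hj1 hj2
    rw [PySem.List.pyGetD_pySetD_natCast cur k j' _ _ (by omega)]
    by_cases hjk : j' = k
    · rw [if_pos hjk, hjk]
    · rw [if_neg hjk]
      exact hinv j' (by omega) hj2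

-- A's forward loop computes lastZero at every index below n
theorem prv_inv (S : List Int) (n : Nat) : ∀ (k : Nat) (cur : List Int), k ≤ n → cur.length = n + 1 →
    PySem.List.pyGetD cur (n : Int) 0 = -1 →
    (∀ j : Nat, j < k → PySem.List.pyGetD cur (j : Int) 0 = lastZero S j) →
    (∀ j : Nat, j < n →
      PySem.List.pyGetD
        ((PySem.List.pyRange (k : Int) (n : Int)).foldl
          (fun prv i =>
            if PySem.List.pyGetD S i 0 == 0 then PySem.List.pySetD prv i i
            else PySem.List.pySetD prv i (PySem.List.pyGetD prv (i - 1) 0)) cur) (j : Int) 0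
        = lastZero S j) ∧
      PySem.List.pyGetD
        ((PySem.List.pyRange (k : Int) (n : Int)).foldl
          (fun prv i =>
            if PySem.List.pyGetD S i 0 == 0 then PySem.List.pySetD prv i i
            else PySem.List.pySetD prv i (PySem.List.pyGetD prv (i - 1) 0)) cur) (n : Int) 0
        = -1 := by
  intro k cur hk hlen hn hinv
  induction hd : n - k using Nat.strongRecOn generalizing k cur with
  | _ d IH =>
    by_cases h : k < n
    · rw [PySem.List.pyRange_one_cons (by omega : (k : Int) < (n : Int)), List.foldl_cons]
      have hvk : (if PySem.List.pyGetD S (k : Int) 0 == 0 then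
            PySem.List.pySetD cur (k : Int) (k : Int)
          else PySem.List.pySetD cur (k : Int) (PySem.List.pyGetD cur ((k : Int) - 1) 0))
          = PySem.List.pySetD cur (k : Int) (lastZero S k) := by
        rw [lastZero]
        by_cases h0 : S.getD k 0 = 0
        · have hb : (PySem.List.pyGetD S (k : Int) 0 == 0) = true := by
            rw [PySem.List.pyGetD_natCast, h0]; rfl
          rw [hb, if_pos h0]
          rfl
        · have hb : (PySem.List.pyGetD S (k : Int) 0 == 0) = false := by
            rw [PySem.List.pyGetD_natCast]; simpa using h0
          rw [hb, if_neg h0]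
          simp only [Bool.false_eq_true, if_false]
          by_cases hk0 : k = 0
          · subst hk0
            rw [dif_pos rfl]
            rw [show ((0 : Nat) : Int) - 1 = -((1 : Nat) : Int) by norm_num]
            rw [PySem.List.pyGetD_neg_natCast cur 1 0 (by omega) (by omega)]
            congr 1
            rw [PySem.List.pyGetD_natCast] at hn
            rw [← List.getD_eq_getElem cur 0 (show cur.length - 1 < cur.length by omega)]
            rw [show cur.length - 1 = n by omega]
            exact hn
          · rw [dif_neg hk0]
            rw [show ((k : Int) - 1) = ((k - 1 : Nat) : Int) by omega,
              hinv (k - 1) (by omega)]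
      rw [hvk]
      refine IH (n - (k + 1)) (by omega) (k + 1) (PySem.List.pySetD cur (k : Int) (lastZero S k))
        (by omega) (by rw [PySem.List.length_pySetD]; exact hlen) ?_ ?_ rfl
      · rw [PySem.List.pyGetD_pySetD_natCast cur k n _ _ (by omega), if_neg (by omega)]
        exact hn
      · intro j' hj'
        rw [PySem.List.pyGetD_pySetD_natCast cur k j' _ _ (by omega)]
        by_cases hjk : j' = k
        · rw [if_pos hjk, hjk]
        · rw [if_neg hjk]
          exact hinv j' (by omega)
    · have hkn : k = n := by omega
      subst hkn
      rw [PySem.List.pyRange_one_eq_nil (by omega), List.foldl_nil]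
      exact ⟨fun j hj => hinv j (by omega), hn⟩

-- B's forward search of the ones list computes firstOne
theorem ones_find (S : List Int) (n : Nat) (x : Int) : ∀ (i : Nat), i ≤ n → x ≤ (i : Int) →
    ((((PySem.List.pyRange (i : Int) (n : Int)).filter
        (fun p => PySem.List.pyGetD S p 0 == 1)).find? (fun p => decide (x ≤ p))).getD (n : Int))
      = firstOne S n i := by
  intro i hin hx
  induction hd : n - i using Nat.strongRecOn generalizing i with
  | _ d IH =>
    by_cases h : i < n
    · rw [PySem.List.pyRange_one_cons (by omega : (i : Int) < (n : Int))]
      rw [firstOne]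
      simp only [h, dif_pos, List.filter_cons]
      by_cases h1 : S.getD i 0 = 1
      · have hb : (PySem.List.pyGetD S (i : Int) 0 == 1) = true := by
          rw [PySem.List.pyGetD_natCast, h1]; rfl
        rw [hb]
        simp only [if_pos, h1]
        rw [List.find?_cons_of_pos (by simpa using hx)]
        rfl
      · have hb : (PySem.List.pyGetD S (i : Int) 0 == 1) = false := by
          rw [PySem.List.pyGetD_natCast]; simpa using h1
        rw [hb]
        simp only [if_false, h1]
        have := IH (n - (i + 1)) (by omega) (i + 1) (by omega) (by push_cast; omega) rfl
        rw [← this]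
        norm_num
    · have hin' : i = n := by omega
      subst hin'
      rw [PySem.List.pyRange_one_eq_nil (by omega), firstOne]
      simp

-- B's backward search of the zeros list computes lastZero
theorem zeros_find (S : List Int) (x : Int) : ∀ (i : Nat), (i : Int) ≤ x →
    ((((PySem.List.pyRange 0 ((i : Int) + 1)).filter
        (fun p => PySem.List.pyGetD S p 0 == 0)).reverse.find? (fun p => decide (p ≤ x))).getD (-1))
      = lastZero S i := by
  intro i
  induction i using Nat.strongRecOn with
  | _ i IH =>
    intro hx
    rw [PySem.List.pyRange_one_succ_right (by positivity : (0 : Int) ≤ (i : Int)),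
      List.filter_append, List.reverse_append, lastZero]
    by_cases h0 : S.getD i 0 = 0
    · have hb : (PySem.List.pyGetD S (i : Int) 0 == 0) = true := by
        rw [PySem.List.pyGetD_natCast, h0]; rfl
      rw [List.filter_cons, hb]
      simp only [if_pos, List.filter_nil, List.reverse_singleton, List.cons_append]
      rw [List.find?_cons_of_pos (by simpa using hx), if_pos h0]
      rfl
    · have hb : (PySem.List.pyGetD S (i : Int) 0 == 0) = false := by
        rw [PySem.List.pyGetD_natCast]
        simpa using h0
      rw [List.filter_cons, hb]
      simp only [if_neg h0, Bool.false_eq_true, if_false, List.filter_nil,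
        List.reverse_nil, List.nil_append]
      by_cases hi : i = 0
      · subst hi
        rw [PySem.List.pyRange_one_eq_nil (by norm_num)]
        simp
      · rw [dif_neg hi]
        have := IH (i - 1) (by omega) (by omega)
        rw [show ((i - 1 : Nat) : Int) + 1 = (i : Int) by omega] at this
        exact this

-- a fold whose step preserves length preserves length
theorem foldl_len {f : List Int → Int → List Int} (hf : ∀ cur x, (f cur x).length = cur.length) :
    ∀ (l : List Int) (cur : List Int), (l.foldl f cur).length = cur.length := by
  intro l
  induction l with
  | nil => intro cur; rfl
  | cons hd tl IH => intro cur; rw [List.foldl_cons, IH, hf]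

-- Python's indexing rule: a raise-free index into a list of length n+1 reads slot i mod (n+1)
theorem pyGetD_wrap (xs : List Int) (n : Nat) (i : Int) (hlen : xs.length = n + 1)
    (h1 : -((n : Int) + 1) ≤ i) (h2 : i ≤ (n : Int)) :
    PySem.List.pyGetD xs i 0 = PySem.List.pyGetD xs (((i % ((n : Int) + 1)).toNat : Nat) : Int) 0 := by
  by_cases h0 : 0 ≤ i
  · rw [Int.emod_eq_of_lt h0 (by omega)]
    rw [show ((i.toNat : Nat) : Int) = i by omega]
  · have hmod : i % ((n : Int) + 1) = i + ((n : Int) + 1) := by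
      rw [Int.emod_eq_add_self_emod]
      exact Int.emod_eq_of_lt (by omega) (by omega)
    rw [hmod]
    have hL := PySem.List.pyGetD_neg_natCast xs (-i).toNat 0 (by omega) (by omega)
    rw [show -(((-i).toNat : Nat) : Int) = i by omega] at hL
    rw [hL, PySem.List.pyGetD_natCast, List.getD_eq_getElem _ _ (by omega)]
    simp only [show xs.length - (-i).toNat = (i + ((n : Int) + 1)).toNat by omega]

theorem solve_spec : Claim_equal_solve := by
  intro N M S segs _hdom hpre
  obtain ⟨_hlen, hseg⟩ := hpre
  by_cases hN : 0 ≤ N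
  case neg =>
    have hsegs : segs = [] := by
      cases hsg : segs with
      | nil => rfl
      | cons hd tl =>
        have := hseg hd (by rw [hsg]; exact List.mem_cons_self)
        omega
    subst hsegs
    rfl
  obtain ⟨n, rfl⟩ : ∃ n : Nat, N = (n : Int) := ⟨N.toNat, by omega⟩
  unfold Spec_solve solve solve_alt
  dsimp only
  congr 1
  refine PySem.List.foldl_congr_mem segs _ _ _ ?_
  intro acc lr hmem
  obtain ⟨_, hl1, hl2, hr1, hr2⟩ := hseg lr hmem
  -- A's nxt loop rewritten as a reverse fold over range(0, n)
  have hrev : PySem.List.pyRange ((n : Int) - 1) (-1) (-1)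
      = (PySem.List.pyRange 0 (n : Int)).reverse := by
    rw [PySem.List.pyRange_neg_one_eq_reverse]
    norm_num
  have hinit1 : PySem.List.pyRepeat [(n : Int)] ((n : Int) + 1)
      = List.replicate (n + 1) ((n : Int)) := by
    rw [PySem.List.pyRepeat_singleton, show ((n : Int) + 1).toNat = n + 1 by omega]
  have hinit2 : PySem.List.pyRepeat [(-1 : Int)] ((n : Int) + 1)
      = List.replicate (n + 1) ((-1 : Int)) := by
    rw [PySem.List.pyRepeat_singleton, show ((n : Int) + 1).toNat = n + 1 by omega]
  rw [hrev, hinit1, hinit2]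
  have hiL0 : 0 ≤ (lr.1 - 1) % ((n : Int) + 1) := Int.emod_nonneg _ (by omega)
  have hiLlt : (lr.1 - 1) % ((n : Int) + 1) < (n : Int) + 1 := Int.emod_lt_of_pos _ (by omega)
  have hjR0 : 0 ≤ (lr.2 - 1) % ((n : Int) + 1) := Int.emod_nonneg _ (by omega)
  have hjRlt : (lr.2 - 1) % ((n : Int) + 1) < (n : Int) + 1 := Int.emod_lt_of_pos _ (by omega)
  set iL : Nat := ((lr.1 - 1) % ((n : Int) + 1)).toNat with hiL
  set jR : Nat := ((lr.2 - 1) % ((n : Int) + 1)).toNat with hjR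
  -- the two built tables keep length n+1
  have hstep1 : ∀ (cur : List Int) (x : Int),
      ((fun nxt i =>
        if PySem.List.pyGetD S i 0 == 1 then PySem.List.pySetD nxt i i
        else PySem.List.pySetD nxt i (PySem.List.pyGetD nxt (i + 1) 0)) cur x).length
      = cur.length := by
    intro cur x
    dsimp only
    split <;> rw [PySem.List.length_pySetD]
  have hstep2 : ∀ (cur : List Int) (x : Int),
      ((fun prv i =>
        if PySem.List.pyGetD S i 0 == 0 then PySem.List.pySetD prv i i
        else PySem.List.pySetD prv i (PySem.List.pyGetD prv (i - 1) 0)) cur x).length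
      = cur.length := by
    intro cur x
    dsimp only
    split <;> rw [PySem.List.length_pySetD]
  have hlen1 := foldl_len hstep1 ((PySem.List.pyRange 0 (n : Int)).reverse)
    (List.replicate (n + 1) ((n : Int)))
  rw [List.length_replicate] at hlen1
  have hlen2 := foldl_len hstep2 (PySem.List.pyRange 0 (n : Int))
    (List.replicate (n + 1) ((-1 : Int)))
  rw [List.length_replicate] at hlen2
  -- B's tables have length n+1 as well
  have hlenB : ∀ v : Int, ∀ f : Int → Int,
      (((PySem.List.pyRange 0 (n : Int)).map f) ++ [v]).length = n + 1 := by
    intro v f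
    rw [List.length_append, List.length_map, PySem.List.length_pyRange_one]
    simp
  -- A's left value
  have hA_left : PySem.List.pyGetD
      (((PySem.List.pyRange 0 (n : Int)).reverse).foldl
        (fun nxt i =>
          if PySem.List.pyGetD S i 0 == 1 then PySem.List.pySetD nxt i i
          else PySem.List.pySetD nxt i (PySem.List.pyGetD nxt (i + 1) 0))
        (List.replicate (n + 1) ((n : Int)))) (lr.1 - 1) 0 = firstOne S n iL := by
    rw [pyGetD_wrap _ n _ hlen1 (by omega) (by omega), ← hiL]
    exact nxt_inv S n n (List.replicate (n + 1) ((n : Int))) (le_refl n)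
      (by simp) (fun j hj1 hj2 => by
        have hjn : j = n := by omega
        subst hjn
        rw [PySem.List.pyGetD_natCast, List.getD_replicate _ (by omega), firstOne,
          dif_neg (by omega)])
      iL (by omega)
  -- A's right value
  obtain ⟨hPl, hPtop⟩ := prv_inv S n 0 (List.replicate (n + 1) ((-1 : Int))) (by omega)
    (by simp) (by rw [PySem.List.pyGetD_natCast, List.getD_replicate _ (by omega)])
    (fun j hj => absurd hj (by omega))
  push_cast at hPl hPtop
  have hA_right : PySem.List.pyGetD
      ((PySem.List.pyRange 0 (n : Int)).foldl
        (fun prv i =>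
          if PySem.List.pyGetD S i 0 == 0 then PySem.List.pySetD prv i i
          else PySem.List.pySetD prv i (PySem.List.pyGetD prv (i - 1) 0))
        (List.replicate (n + 1) ((-1 : Int)))) (lr.2 - 1) 0
      = (if jR = n then -1 else lastZero S jR) := by
    rw [pyGetD_wrap _ n _ hlen2 (by omega) (by omega), ← hjR]
    by_cases hj : jR = n
    · rw [if_pos hj, hj]
      exact hPtop
    · rw [if_neg hj]
      exact hPl jR (by omega)
  -- B's left value: the nxt table slot
  have hB_left : PySem.List.pyGetD
      ((((PySem.List.pyRange 0 (n : Int)).map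
        (fun i => (((PySem.List.pyRange 0 (n : Int)).filter
          (fun p => PySem.List.pyGetD S p 0 == 1)).find?
            (fun p => decide (i ≤ p))).getD (n : Int))) ++ [(n : Int)])) (lr.1 - 1) 0
      = firstOne S n iL := by
    rw [pyGetD_wrap _ n _ (hlenB _ _) (by omega) (by omega), ← hiL,
      PySem.List.pyGetD_natCast, List.getD_eq_getElem _ _ (by rw [hlenB]; omega)]
    by_cases hi : iL = n
    · rw [List.getElem_append_right (by rw [List.length_map, PySem.List.length_pyRange_one]; omega),
        List.getElem_singleton, firstOne, dif_neg (by omega)]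
    · rw [List.getElem_append_left (by rw [List.length_map, PySem.List.length_pyRange_one]; omega),
        List.getElem_map, PySem.List.getElem_pyRange_one]
      simp only [zero_add]
      rw [PySem.List.pyRange_one_append 0 (iL : Int) (n : Int) (by omega) (by omega),
        List.filter_append, List.find?_append]
      have h1 : ((PySem.List.pyRange 0 (iL : Int)).filter
          (fun p => PySem.List.pyGetD S p 0 == 1)).find? (fun p => decide ((iL : Int) ≤ p)) = none := by
        rw [List.find?_eq_none]
        intro p hp
        have := PySem.List.mem_pyRange_one.mp (List.mem_filter.mp hp).1
        simpa using by omega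
      rw [h1, Option.none_or]
      exact ones_find S n (iL : Int) iL (by omega) (by omega)
  -- B's right value: the prv table slot
  have hB_right : PySem.List.pyGetD
      ((((PySem.List.pyRange 0 (n : Int)).map
        (fun i => ((((PySem.List.pyRange 0 (n : Int)).filter
          (fun p => PySem.List.pyGetD S p 0 == 0)).reverse).find?
            (fun p => decide (p ≤ i))).getD (-1))) ++ [(-1 : Int)])) (lr.2 - 1) 0
      = (if jR = n then -1 else lastZero S jR) := by
    rw [pyGetD_wrap _ n _ (hlenB _ _) (by omega) (by omega), ← hjR,
      PySem.List.pyGetD_natCast, List.getD_eq_getElem _ _ (by rw [hlenB]; omega)]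
    by_cases hj : jR = n
    · rw [List.getElem_append_right (by rw [List.length_map, PySem.List.length_pyRange_one]; omega),
        List.getElem_singleton, if_pos hj]
    · rw [List.getElem_append_left (by rw [List.length_map, PySem.List.length_pyRange_one]; omega),
        List.getElem_map, PySem.List.getElem_pyRange_one]
      simp only [zero_add]
      rw [if_neg hj]
      rw [PySem.List.pyRange_one_append 0 ((jR : Int) + 1) (n : Int) (by omega) (by omega),
        List.filter_append, List.reverse_append, List.find?_append]
      have h1 : (((PySem.List.pyRange ((jR : Int) + 1) (n : Int)).filter
          (fun p => PySem.List.pyGetD S p 0 == 0)).reverse).find?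
            (fun p => decide (p ≤ (jR : Int))) = none := by
        rw [List.find?_eq_none]
        intro p hp
        have := PySem.List.mem_pyRange_one.mp (List.mem_filter.mp (List.mem_reverse.mp hp)).1
        simpa using by omega
      rw [h1, Option.none_or]
      exact zeros_find S ((jR : Int)) jR (by omega)
  rw [hA_left, hA_right, hB_left, hB_right]
  by_cases hc : firstOne S n iL ≤ (if jR = n then -1 else lastZero S jR)
  · rw [if_neg (by omega), if_pos hc]
  · rw [if_pos (by omega), if_neg hc]
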